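-- pv_equiv track=rewrite | github.com/pwviptbl/ReconForge | scripts/main.py | _select_plugins_for_goal
-- ===== SOURCE A (Python) =====
-- def _select_plugins_for_goal(goal: str, available_plugins: list[str]) -> list[str]:
--     """
--     Seleciona plugins relevantes baseado no objetivo/orientação informado
--
--     Args:
--         goal: Objetivo descrito pelo usuário (ex: "encontrar vulnerabilidades web")
--         available_plugins: Lista de plugins disponíveis
--
--     Returns:
--         Lista de plugins selecionados para o objetivo
--     """
--     goal_lower = goal.lower()
--     selected = set()
--
--     # Mapeamento de palavras-chave para plugins
--     keyword_mapping = {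
--         # Web/HTTP
--         'web': ['DirectoryScannerPlugin', 'WebCrawlerPlugin', 'KatanaCrawlerPlugin', 'GauCollectorPlugin',
--                 'WebVulnScannerPlugin', 'TechnologyDetectorPlugin', 'HeaderAnalyzerPlugin'],
--         'diretório': ['DirectoryScannerPlugin'],
--         'directory': ['DirectoryScannerPlugin'],
--         'crawl': ['WebCrawlerPlugin'],
--         'spider': ['WebCrawlerPlugin'],
--         'katana': ['KatanaCrawlerPlugin'],
--         'gau': ['GauCollectorPlugin'],
--
--         # Vulnerabilidades
--         'vuln': ['NucleiScannerPlugin', 'WebVulnScannerPlugin', 'MisconfigurationAnalyzerPlugin'],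
--         'vulnerabilidade': ['NucleiScannerPlugin', 'WebVulnScannerPlugin', 'MisconfigurationAnalyzerPlugin'],
--         'cve': ['ExploitSearcherPlugin', 'ExploitSuggesterPlugin'],
--         'exploit': ['ExploitSearcherPlugin', 'ExploitSuggesterPlugin'],
--
--         # Rede
--         'rede': ['PortScannerPlugin', 'NetworkMapperPlugin', 'NmapScannerPlugin'],
--         'network': ['PortScannerPlugin', 'NetworkMapperPlugin', 'NmapScannerPlugin'],
--         'porta': ['PortScannerPlugin', 'NmapScannerPlugin', 'PortExposureAuditPlugin'],
--         'port': ['PortScannerPlugin', 'NmapScannerPlugin', 'PortExposureAuditPlugin'],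
--         'scan': ['PortScannerPlugin', 'NmapScannerPlugin'],
--         'nmap': ['NmapScannerPlugin'],
--
--         # DNS e subdomínios
--         'dns': ['DNSResolverPlugin', 'SubdomainEnumeratorPlugin'],
--         'subdomain': ['SubdomainEnumeratorPlugin', 'SubfinderPlugin'],
--         'subdomínio': ['SubdomainEnumeratorPlugin', 'SubfinderPlugin'],
--
--         # SSL/TLS
--         'ssl': ['SSLAnalyzerPlugin'],
--         'tls': ['SSLAnalyzerPlugin'],
--         'certificado': ['SSLAnalyzerPlugin'],
--         'https': ['SSLAnalyzerPlugin'],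
--
--         # Firewall/WAF
--         'firewall': ['FirewallDetectorPlugin'],
--         'waf': ['FirewallDetectorPlugin'],
--         'bypass': ['FirewallDetectorPlugin'],
--
--         # SSH
--         'ssh': ['SSHPolicyCheckPlugin'],
--
--         # Reconhecimento
--         'recon': ['ReconnaissancePlugin', 'TechnologyDetectorPlugin', 'WhatWebScannerPlugin'],
--         'reconhecimento': ['ReconnaissancePlugin', 'TechnologyDetectorPlugin'],
--         'tecnologia': ['TechnologyDetectorPlugin', 'WhatWebScannerPlugin'],
--         'technology': ['TechnologyDetectorPlugin', 'WhatWebScannerPlugin'],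
--
--         # Completo
--         'completo': available_plugins,
--         'full': available_plugins,
--         'tudo': available_plugins,
--         'all': available_plugins,
--     }
--
--     # Buscar plugins baseado nas palavras-chave
--     for keyword, plugins in keyword_mapping.items():
--         if keyword in goal_lower:
--             for plugin in plugins:
--                 if plugin in available_plugins:
--                     selected.add(plugin)
--
--     # Se nenhum plugin foi selecionado, usar conjunto padrão
--     if not selected:
--         default_plugins = ['PortScannerPlugin', 'TechnologyDetectorPlugin']
--         for plugin in default_plugins:
--             if plugin in available_plugins:
--                 selected.add(plugin)
--
--     # Sempre incluir PortScanner como base (se disponível)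
--     if 'PortScannerPlugin' in available_plugins:
--         selected.add('PortScannerPlugin')
--
--     return list(selected)
-- ===== SOURCE B (Python) =====
-- # B: inverted index (plugin -> its trigger keywords); iterate over the available plugins instead of the
-- # keyword table; return the selection sorted (Python A returns list(set(...)), whose order is hash-arbitrary;
-- # the equivalence is about the selected SET of plugins).
-- _TRIGGERS_BY_PLUGIN = {
--     'DirectoryScannerPlugin': ('web', 'diretório', 'directory'),
--     'WebCrawlerPlugin': ('web', 'crawl', 'spider'),
--     'KatanaCrawlerPlugin': ('web', 'katana'),
--     'GauCollectorPlugin': ('web', 'gau'),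
--     'WebVulnScannerPlugin': ('web', 'vuln', 'vulnerabilidade'),
--     'TechnologyDetectorPlugin': ('web', 'recon', 'reconhecimento', 'tecnologia', 'technology'),
--     'HeaderAnalyzerPlugin': ('web',),
--     'NucleiScannerPlugin': ('vuln', 'vulnerabilidade'),
--     'MisconfigurationAnalyzerPlugin': ('vuln', 'vulnerabilidade'),
--     'ExploitSearcherPlugin': ('cve', 'exploit'),
--     'ExploitSuggesterPlugin': ('cve', 'exploit'),
--     'PortScannerPlugin': ('rede', 'network', 'porta', 'port', 'scan'),
--     'NetworkMapperPlugin': ('rede', 'network'),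
--     'NmapScannerPlugin': ('rede', 'network', 'porta', 'port', 'scan', 'nmap'),
--     'PortExposureAuditPlugin': ('porta', 'port'),
--     'DNSResolverPlugin': ('dns',),
--     'SubdomainEnumeratorPlugin': ('dns', 'subdomain', 'subdomínio'),
--     'SubfinderPlugin': ('subdomain', 'subdomínio'),
--     'SSLAnalyzerPlugin': ('ssl', 'tls', 'certificado', 'https'),
--     'FirewallDetectorPlugin': ('firewall', 'waf', 'bypass'),
--     'SSHPolicyCheckPlugin': ('ssh',),
--     'ReconnaissancePlugin': ('recon', 'reconhecimento'),
--     'WhatWebScannerPlugin': ('recon', 'tecnologia', 'technology'),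
-- }
--
--
-- def _select_plugins_for_goal(goal: str, available_plugins: list[str]) -> list[str]:
--     g = goal.lower()
--     full = any(k in g for k in ('completo', 'full', 'tudo', 'all'))
--     chosen = {p for p in available_plugins
--               if full or any(k in g for k in _TRIGGERS_BY_PLUGIN.get(p, ()))}
--     if not chosen:
--         chosen = {p for p in ('PortScannerPlugin', 'TechnologyDetectorPlugin')
--                   if p in available_plugins}
--     if 'PortScannerPlugin' in available_plugins:
--         chosen.add('PortScannerPlugin')
--     return sorted(chosen)
-- ===== Notes on version B (the rewrite author's own statement) =====
-- stated objective: alternative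
-- what changed: Replaces the per-call keyword->plugin-list dict scanned with nested loops and per-plugin availability checks by an inverted index (plugin -> its trigger keywords): B iterates once over available_plugins, keeping a plugin when the goal is a 'select everything' goal or any of its trigger keywords occurs in goal.lower(), and returns the selection in deterministic sorted order (A returns list(set(...)), whose order is hash-arbitrary; the equivalence is about the selected set).
import Mathlib
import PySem

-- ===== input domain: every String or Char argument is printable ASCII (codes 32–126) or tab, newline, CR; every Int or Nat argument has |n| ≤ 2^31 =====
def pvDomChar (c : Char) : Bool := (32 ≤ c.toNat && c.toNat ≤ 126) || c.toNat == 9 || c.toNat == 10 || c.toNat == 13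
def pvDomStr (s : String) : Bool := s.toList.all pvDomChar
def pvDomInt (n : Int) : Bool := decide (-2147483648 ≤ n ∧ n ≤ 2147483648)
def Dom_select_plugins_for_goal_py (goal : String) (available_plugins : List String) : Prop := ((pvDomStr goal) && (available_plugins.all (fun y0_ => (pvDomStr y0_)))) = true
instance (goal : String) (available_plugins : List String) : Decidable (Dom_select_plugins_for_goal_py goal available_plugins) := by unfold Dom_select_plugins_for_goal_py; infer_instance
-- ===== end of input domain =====

-- B inverts the keyword→plugins table into a plugin→trigger-keywords index and iterates over the
-- available plugins instead of the keyword table; the equivalence is about the selected SET of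
-- plugins: Python A's final list(set(...)) iteration order is hash-arbitrary and not modelled, so
-- both ports render the selection in canonical sorted order (B's Python returns it sorted as well).

-- ===== PORT A =====
def pvKeywordMapping (available_plugins : List String) : List (String × List String) := [
  ("web", ["DirectoryScannerPlugin", "WebCrawlerPlugin", "KatanaCrawlerPlugin", "GauCollectorPlugin", "WebVulnScannerPlugin", "TechnologyDetectorPlugin", "HeaderAnalyzerPlugin"]),
  ("diretório", ["DirectoryScannerPlugin"]),
  ("directory", ["DirectoryScannerPlugin"]),
  ("crawl", ["WebCrawlerPlugin"]),
  ("spider", ["WebCrawlerPlugin"]),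
  ("katana", ["KatanaCrawlerPlugin"]),
  ("gau", ["GauCollectorPlugin"]),
  ("vuln", ["NucleiScannerPlugin", "WebVulnScannerPlugin", "MisconfigurationAnalyzerPlugin"]),
  ("vulnerabilidade", ["NucleiScannerPlugin", "WebVulnScannerPlugin", "MisconfigurationAnalyzerPlugin"]),
  ("cve", ["ExploitSearcherPlugin", "ExploitSuggesterPlugin"]),
  ("exploit", ["ExploitSearcherPlugin", "ExploitSuggesterPlugin"]),
  ("rede", ["PortScannerPlugin", "NetworkMapperPlugin", "NmapScannerPlugin"]),
  ("network", ["PortScannerPlugin", "NetworkMapperPlugin", "NmapScannerPlugin"]),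
  ("porta", ["PortScannerPlugin", "NmapScannerPlugin", "PortExposureAuditPlugin"]),
  ("port", ["PortScannerPlugin", "NmapScannerPlugin", "PortExposureAuditPlugin"]),
  ("scan", ["PortScannerPlugin", "NmapScannerPlugin"]),
  ("nmap", ["NmapScannerPlugin"]),
  ("dns", ["DNSResolverPlugin", "SubdomainEnumeratorPlugin"]),
  ("subdomain", ["SubdomainEnumeratorPlugin", "SubfinderPlugin"]),
  ("subdomínio", ["SubdomainEnumeratorPlugin", "SubfinderPlugin"]),
  ("ssl", ["SSLAnalyzerPlugin"]),
  ("tls", ["SSLAnalyzerPlugin"]),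
  ("certificado", ["SSLAnalyzerPlugin"]),
  ("https", ["SSLAnalyzerPlugin"]),
  ("firewall", ["FirewallDetectorPlugin"]),
  ("waf", ["FirewallDetectorPlugin"]),
  ("bypass", ["FirewallDetectorPlugin"]),
  ("ssh", ["SSHPolicyCheckPlugin"]),
  ("recon", ["ReconnaissancePlugin", "TechnologyDetectorPlugin", "WhatWebScannerPlugin"]),
  ("reconhecimento", ["ReconnaissancePlugin", "TechnologyDetectorPlugin"]),
  ("tecnologia", ["TechnologyDetectorPlugin", "WhatWebScannerPlugin"]),
  ("technology", ["TechnologyDetectorPlugin", "WhatWebScannerPlugin"]),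
  ("completo", available_plugins),
  ("full", available_plugins),
  ("tudo", available_plugins),
  ("all", available_plugins)]

def select_plugins_for_goal_py (goal : String) (available_plugins : List String) : List String :=
  let goal_lower := PySem.Str.lower goal
  let selected : PySem.Set String :=
    (pvKeywordMapping available_plugins).foldl
      (fun selected kp =>
        if PySem.Str.isIn kp.1 goal_lower then
          kp.2.foldl
            (fun selected plugin =>
              if available_plugins.contains plugin then PySem.Set.add selected plugin else selected)
            selected
        else selected)
      PySem.Set.empty
  let selected :=
    if selected.isEmpty then
      ["PortScannerPlugin", "TechnologyDetectorPlugin"].foldl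
        (fun selected plugin =>
          if available_plugins.contains plugin then PySem.Set.add selected plugin else selected)
        selected
    else selected
  let selected :=
    if available_plugins.contains "PortScannerPlugin" then
      PySem.Set.add selected "PortScannerPlugin"
    else selected
  -- list(selected): a Python set's iteration order is hash-arbitrary (not modelled by PySem);
  -- it is rendered canonically as the sorted list of the set's elements.
  PySem.List.sorted selected (fun x => x) false

-- ===== PORT B =====
-- _TRIGGERS_BY_PLUGIN.get(p, ()) : the inverted index, a total function with default []
def pvTriggersByPlugin : String → List String
  | "DirectoryScannerPlugin" => ["web", "diretório", "directory"]
  | "WebCrawlerPlugin" => ["web", "crawl", "spider"]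
  | "KatanaCrawlerPlugin" => ["web", "katana"]
  | "GauCollectorPlugin" => ["web", "gau"]
  | "WebVulnScannerPlugin" => ["web", "vuln", "vulnerabilidade"]
  | "TechnologyDetectorPlugin" => ["web", "recon", "reconhecimento", "tecnologia", "technology"]
  | "HeaderAnalyzerPlugin" => ["web"]
  | "NucleiScannerPlugin" => ["vuln", "vulnerabilidade"]
  | "MisconfigurationAnalyzerPlugin" => ["vuln", "vulnerabilidade"]
  | "ExploitSearcherPlugin" => ["cve", "exploit"]
  | "ExploitSuggesterPlugin" => ["cve", "exploit"]
  | "PortScannerPlugin" => ["rede", "network", "porta", "port", "scan"]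
  | "NetworkMapperPlugin" => ["rede", "network"]
  | "NmapScannerPlugin" => ["rede", "network", "porta", "port", "scan", "nmap"]
  | "PortExposureAuditPlugin" => ["porta", "port"]
  | "DNSResolverPlugin" => ["dns"]
  | "SubdomainEnumeratorPlugin" => ["dns", "subdomain", "subdomínio"]
  | "SubfinderPlugin" => ["subdomain", "subdomínio"]
  | "SSLAnalyzerPlugin" => ["ssl", "tls", "certificado", "https"]
  | "FirewallDetectorPlugin" => ["firewall", "waf", "bypass"]
  | "SSHPolicyCheckPlugin" => ["ssh"]
  | "ReconnaissancePlugin" => ["recon", "reconhecimento"]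
  | "WhatWebScannerPlugin" => ["recon", "tecnologia", "technology"]
  | _ => []

def select_plugins_for_goal_py_alt (goal : String) (available_plugins : List String) : List String :=
  let g := PySem.Str.lower goal
  let full := ["completo", "full", "tudo", "all"].any (fun k => PySem.Str.isIn k g)
  let chosen : PySem.Set String :=
    PySem.Set.ofList (available_plugins.filter
      (fun p => full || (pvTriggersByPlugin p).any (fun k => PySem.Str.isIn k g)))
  let chosen :=
    if chosen.isEmpty then
      PySem.Set.ofList (["PortScannerPlugin", "TechnologyDetectorPlugin"].filter
        (fun p => available_plugins.contains p))
    else chosen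
  let chosen :=
    if available_plugins.contains "PortScannerPlugin" then
      PySem.Set.add chosen "PortScannerPlugin"
    else chosen
  PySem.List.sorted chosen (fun x => x) false

-- ===== PRECONDITION & SPEC =====
def Spec_select_plugins_for_goal_py (goal : String) (available_plugins : List String) (out : List String) : Prop := out = select_plugins_for_goal_py_alt goal available_plugins
instance (goal : String) (available_plugins : List String) (out : List String) : Decidable (Spec_select_plugins_for_goal_py goal available_plugins out) := by unfold Spec_select_plugins_for_goal_py; infer_instance

-- ===== CLAIM (what is proved, stated in full; the proofs are below) =====
def Claim_equal_select_plugins_for_goal_py : Prop := ∀ (goal : String) (available_plugins : List String), Dom_select_plugins_for_goal_py goal available_plugins → Spec_select_plugins_for_goal_py goal available_plugins (select_plugins_for_goal_py goal available_plugins)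

-- ===== LEMMAS AND PROOFS =====

-- the non-'all' part of A's keyword mapping (proof-side helper)
def pvSpecKwmap : List (String × List String) := [
  ("web", ["DirectoryScannerPlugin", "WebCrawlerPlugin", "KatanaCrawlerPlugin", "GauCollectorPlugin", "WebVulnScannerPlugin", "TechnologyDetectorPlugin", "HeaderAnalyzerPlugin"]),
  ("diretório", ["DirectoryScannerPlugin"]),
  ("directory", ["DirectoryScannerPlugin"]),
  ("crawl", ["WebCrawlerPlugin"]),
  ("spider", ["WebCrawlerPlugin"]),
  ("katana", ["KatanaCrawlerPlugin"]),
  ("gau", ["GauCollectorPlugin"]),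
  ("vuln", ["NucleiScannerPlugin", "WebVulnScannerPlugin", "MisconfigurationAnalyzerPlugin"]),
  ("vulnerabilidade", ["NucleiScannerPlugin", "WebVulnScannerPlugin", "MisconfigurationAnalyzerPlugin"]),
  ("cve", ["ExploitSearcherPlugin", "ExploitSuggesterPlugin"]),
  ("exploit", ["ExploitSearcherPlugin", "ExploitSuggesterPlugin"]),
  ("rede", ["PortScannerPlugin", "NetworkMapperPlugin", "NmapScannerPlugin"]),
  ("network", ["PortScannerPlugin", "NetworkMapperPlugin", "NmapScannerPlugin"]),
  ("porta", ["PortScannerPlugin", "NmapScannerPlugin", "PortExposureAuditPlugin"]),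
  ("port", ["PortScannerPlugin", "NmapScannerPlugin", "PortExposureAuditPlugin"]),
  ("scan", ["PortScannerPlugin", "NmapScannerPlugin"]),
  ("nmap", ["NmapScannerPlugin"]),
  ("dns", ["DNSResolverPlugin", "SubdomainEnumeratorPlugin"]),
  ("subdomain", ["SubdomainEnumeratorPlugin", "SubfinderPlugin"]),
  ("subdomínio", ["SubdomainEnumeratorPlugin", "SubfinderPlugin"]),
  ("ssl", ["SSLAnalyzerPlugin"]),
  ("tls", ["SSLAnalyzerPlugin"]),
  ("certificado", ["SSLAnalyzerPlugin"]),
  ("https", ["SSLAnalyzerPlugin"]),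
  ("firewall", ["FirewallDetectorPlugin"]),
  ("waf", ["FirewallDetectorPlugin"]),
  ("bypass", ["FirewallDetectorPlugin"]),
  ("ssh", ["SSHPolicyCheckPlugin"]),
  ("recon", ["ReconnaissancePlugin", "TechnologyDetectorPlugin", "WhatWebScannerPlugin"]),
  ("reconhecimento", ["ReconnaissancePlugin", "TechnologyDetectorPlugin"]),
  ("tecnologia", ["TechnologyDetectorPlugin", "WhatWebScannerPlugin"]),
  ("technology", ["TechnologyDetectorPlugin", "WhatWebScannerPlugin"])]

-- a conditional-add loop is Set.update with the filtered list
theorem pv_condFold (c : String → Bool) (ps : List String) (s : PySem.Set String) :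
    ps.foldl (fun s p => if c p then PySem.Set.add s p else s) s
      = PySem.Set.update s (ps.filter c) := by
  induction ps generalizing s with
  | nil => rfl
  | cons p ps ih =>
      by_cases h : c p = true <;> simp [List.filter, h, ih, PySem.Set.update]

theorem pv_update_append (s : PySem.Set String) (xs ys : List String) :
    PySem.Set.update s (xs ++ ys) = PySem.Set.update (PySem.Set.update s xs) ys := by
  simp [PySem.Set.update, List.foldl_append]

-- A's outer loop over the keyword table, flattened (stated with the concrete tests so rw matches)
theorem pv_A_fold (g : String) (avail : List String)
    (L : List (String × List String)) (s : PySem.Set String) :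
    L.foldl
      (fun s kp =>
        if PySem.Str.isIn kp.1 g then
          kp.2.foldl (fun s p => if avail.contains p then PySem.Set.add s p else s) s
        else s) s
      = PySem.Set.update s (L.flatMap
          (fun kp => if PySem.Str.isIn kp.1 g then kp.2.filter (fun p => avail.contains p) else [])) := by
  induction L generalizing s with
  | nil => rfl
  | cons kp L ih =>
      rw [List.foldl_cons, List.flatMap_cons]
      by_cases h : PySem.Str.isIn kp.1 g = true
      · rw [if_pos h, if_pos h, pv_condFold, ih, ← pv_update_append]
      · rw [if_neg h, if_neg h, ih]
        simp

theorem pv_update_empty (xs : List String) :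
    PySem.Set.update PySem.Set.empty xs = PySem.Set.ofList xs := by
  rw [PySem.Set.ofList_eq_foldl]; rfl

-- the forward keyword table and the inverted plugin index trigger the same plugins
theorem pv_bridge (t : String → Bool) (x : String) :
    pvSpecKwmap.any (fun kp => t kp.1 && kp.2.contains x)
      = (pvTriggersByPlugin x).any t := by
  unfold pvTriggersByPlugin
  split <;> (simp [pvSpecKwmap]; try (constructor <;> tauto))

-- membership in an 'if keyword matches then availability-filtered plugins' flatMap
theorem pv_mem_flat (t c : String → Bool) (L : List (String × List String)) (x : String) :
    x ∈ L.flatMap (fun kp => if t kp.1 then kp.2.filter c else [])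
      ↔ (∃ kp, kp ∈ L ∧ t kp.1 = true ∧ x ∈ kp.2) ∧ c x = true := by
  rw [List.mem_flatMap]
  constructor
  · rintro ⟨kp, h1, h2⟩
    by_cases ht : t kp.1 = true
    · rw [if_pos ht] at h2
      have h3 := List.mem_filter.mp h2
      exact ⟨⟨kp, h1, ht, h3.1⟩, h3.2⟩
    · rw [if_neg ht] at h2; cases h2
  · rintro ⟨⟨kp, h1, ht, hx⟩, hc⟩
    exact ⟨kp, h1, by rw [if_pos ht]; exact List.mem_filter.mpr ⟨hx, hc⟩⟩

-- Set.add preserves Nodup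
theorem pv_nodup_add (s : PySem.Set String) (x : String) (h : s.Nodup) :
    (PySem.Set.add s x).Nodup := by
  by_cases hc : PySem.Set.contains s x = true <;>
    simp_all [PySem.Set.add, PySem.Set.contains_eq_listContains, List.nodup_append]
  exact fun a ha heq => hc (heq ▸ ha)

-- membership in A's selected set, phrased through B's inverted index
theorem pv_memA (t : String → Bool) (avail : List String) (x : String) :
    (x ∈ (pvKeywordMapping avail).flatMap
        (fun kp => if t kp.1 then kp.2.filter (fun p => avail.contains p) else []))
      ↔ (x ∈ avail ∧ ((["completo", "full", "tudo", "all"].any t = true)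
            ∨ (pvTriggersByPlugin x).any t = true)) := by
  rw [pv_mem_flat]
  have hsplit : pvKeywordMapping avail
      = pvSpecKwmap ++ [("completo", avail), ("full", avail), ("tudo", avail), ("all", avail)] := rfl
  rw [hsplit]
  constructor
  · rintro ⟨⟨kp, hmem, ht, hx⟩, hc⟩
    refine ⟨by simpa using hc, ?_⟩
    rcases List.mem_append.mp hmem with h | h
    · right
      rw [← pv_bridge t x, List.any_eq_true]
      exact ⟨kp, h, by simp [ht, hx]⟩
    · left
      rw [List.any_eq_true]
      fin_cases h <;> exact ⟨_, by simp, ht⟩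
  · rintro ⟨hx, h | h⟩
    · rw [List.any_eq_true] at h
      obtain ⟨k, hk, htk⟩ := h
      refine ⟨⟨(k, avail), List.mem_append.mpr (Or.inr ?_), htk, hx⟩, by simpa using hx⟩
      fin_cases hk <;> simp
    · rw [← pv_bridge t x, List.any_eq_true] at h
      obtain ⟨kp, hkp, hb⟩ := h
      rw [Bool.and_eq_true] at hb
      exact ⟨⟨kp, List.mem_append.mpr (Or.inl hkp), hb.1, by simpa using hb.2⟩, by simpa using hx⟩

-- the common tail: fallback-if plus unconditional PortScanner add, for sets with equal membership
theorem pv_tail2 (avail LA : List String) (p : String → Bool)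
    (hmem : ∀ y, y ∈ PySem.Set.ofList LA ↔ y ∈ PySem.Set.ofList (avail.filter p)) :
    PySem.List.sorted
      (if avail.contains "PortScannerPlugin" then
        PySem.Set.add
          (if (PySem.Set.ofList LA).isEmpty then
            ["PortScannerPlugin", "TechnologyDetectorPlugin"].foldl
              (fun s q => if avail.contains q then PySem.Set.add s q else s)
              (PySem.Set.ofList LA)
          else PySem.Set.ofList LA) "PortScannerPlugin"
      else
        (if (PySem.Set.ofList LA).isEmpty then
          ["PortScannerPlugin", "TechnologyDetectorPlugin"].foldl
            (fun s q => if avail.contains q then PySem.Set.add s q else s)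
            (PySem.Set.ofList LA)
        else PySem.Set.ofList LA)) (fun x => x) false
    = PySem.List.sorted
      (if avail.contains "PortScannerPlugin" then
        PySem.Set.add
          (if (PySem.Set.ofList (avail.filter p)).isEmpty then
            PySem.Set.ofList (["PortScannerPlugin", "TechnologyDetectorPlugin"].filter
              (fun q => avail.contains q))
          else PySem.Set.ofList (avail.filter p)) "PortScannerPlugin"
      else
        (if (PySem.Set.ofList (avail.filter p)).isEmpty then
          PySem.Set.ofList (["PortScannerPlugin", "TechnologyDetectorPlugin"].filter
            (fun q => avail.contains q))
        else PySem.Set.ofList (avail.filter p))) (fun x => x) false := by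
  by_cases hE : PySem.Set.ofList LA = []
  · have hB : PySem.Set.ofList (avail.filter p) = [] := by
      rw [List.eq_nil_iff_forall_not_mem]
      intro y hy
      exact (List.eq_nil_iff_forall_not_mem.mp hE y) ((hmem y).mpr hy)
    rw [hE, hB, pv_condFold]
    rfl
  · have hB : PySem.Set.ofList (avail.filter p) ≠ [] := by
      intro hB
      rcases List.exists_mem_of_ne_nil _ hE with ⟨y, hy⟩
      exact (List.not_mem_nil (a := y)) (hB ▸ (hmem y).mp hy)
    have hEA : (PySem.Set.ofList LA).isEmpty = false := by
      simpa [List.isEmpty_iff] using hE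
    have hEB : (PySem.Set.ofList (avail.filter p)).isEmpty = false := by
      simpa [List.isEmpty_iff] using hB
    rw [hEA, hEB]
    simp only [Bool.false_eq_true, if_false]
    have hndA := PySem.Set.nodup_ofList LA
    have hndB := PySem.Set.nodup_ofList (avail.filter p)
    by_cases hP : avail.contains "PortScannerPlugin" = true
    · rw [if_pos hP, if_pos hP]
      refine (PySem.List.sorted_id_eq_sorted_id_iff_perm _ _).mpr ?_
      refine (List.perm_ext_iff_of_nodup (pv_nodup_add _ _ hndA) (pv_nodup_add _ _ hndB)).mpr ?_
      intro y
      rw [PySem.Set.mem_add, PySem.Set.mem_add, hmem y]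
    · rw [if_neg hP, if_neg hP]
      exact (PySem.List.sorted_id_eq_sorted_id_iff_perm _ _).mpr
        ((List.perm_ext_iff_of_nodup hndA hndB).mpr hmem)

-- ===== VERDICT (by name: the statement is the Claim_ definition above) =====
theorem select_plugins_for_goal_py_spec : Claim_equal_select_plugins_for_goal_py := by
  intro goal avail _
  unfold Spec_select_plugins_for_goal_py
  simp only [select_plugins_for_goal_py, select_plugins_for_goal_py_alt]
  rw [pv_A_fold, pv_update_empty]
  refine pv_tail2 avail _ _ ?_
  intro y
  rw [PySem.Set.mem_ofList, PySem.Set.mem_ofList, List.mem_filter, Bool.or_eq_true]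
  exact pv_memA (fun k => PySem.Str.isIn k (PySem.Str.lower goal)) avail y
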